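-- pv_equiv track=rewrite | github.com/mathncode/solving-algo-daily | level1/2021-02-27.py | solution
-- ===== SOURCE A (Python) =====
-- def solution(answers):
--     answer = []
--
--     #각 학생 찍는 패턴
--     supo1p = [1, 2, 3, 4, 5]
--     supo2p = [2, 1, 2, 3, 2, 4, 2, 5]
--     supo3p = [3, 3, 1, 1, 2, 2, 4, 4, 5, 5]
--
--     #각 학생 맞힌 문제 개수
--     supo1 = 0
--     supo2 = 0
--     supo3 = 0
--
--     for i in range(len(answers)):
--         if answers[i] == supo1p[i%5]: supo1 += 1
--         if answers[i] == supo2p[i%8]: supo2 += 1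
--         if answers[i] == supo3p[i%10]: supo3 += 1
--
--
--     # 높은 점수 받은 사람 찾기
--     if supo1 == supo2 == supo3: answer = [1, 2, 3] #1=2=3
--     elif supo3 > supo2 == supo1: answer = [3] #1=2<3
--     elif supo3 < supo1 == supo2: answer = [1, 2] #3<1=2
--     elif supo2 > supo3 == supo1: answer = [2] #1=3<2
--     elif supo2 < supo1 == supo3: answer = [1, 3] #2<1=3
--     elif supo1 > supo2 == supo3: answer = [1] #2=3<1
--     elif supo1 < supo2 == supo3: answer = [2, 3] #1<2=3
--     elif supo1 > supo2 > supo3: answer = [1] #3<2<1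
--     elif supo3 > supo1 > supo2: answer = [3] #1<2<3
--     elif supo2 > supo1 > supo3: answer = [2] #3<1<2
--     elif supo1 > supo3 > supo2: answer = [1] #2<3<1
--     elif supo2 > supo3 > supo1: answer = [2] #1<3<2
--     elif supo3 > supo2 > supo1: answer = [3] #1<2<3
--
--     return answer
-- ===== SOURCE B (Python) =====
-- def solution(answers):
--     # Three staged passes, one per student: the guessing pattern is consumed
--     # as a queue (head compared, tail kept, refilled when exhausted), so no
--     # index/modulo arithmetic is needed; winners are then selected by
--     # max-and-filter over the enumerated score list.
--     def score(pattern):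
--         s, rem = 0, []
--         for a in answers:
--             if not rem:
--                 rem = pattern
--             if a == rem[0]:
--                 s += 1
--             rem = rem[1:]
--         return s
--
--     scores = [score(p) for p in ([1, 2, 3, 4, 5],
--                                  [2, 1, 2, 3, 2, 4, 2, 5],
--                                  [3, 3, 1, 1, 2, 2, 4, 4, 5, 5])]
--     best = max(scores)
--     return [i + 1 for i, s in enumerate(scores) if s == best]
-- ===== Notes on version B (the rewrite author's own statement) =====
-- stated objective: alternative
-- what changed: A's single fused loop that counts all three students via index/modulo arithmetic (answers[i] vs pattern[i%k]) and a 13-branch comparison cascade is replaced by three staged passes, each consuming its pattern as a queue that is refilled when exhausted (no index or modulo arithmetic), followed by max-and-filter selection over the enumerated score list.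
import Mathlib
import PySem

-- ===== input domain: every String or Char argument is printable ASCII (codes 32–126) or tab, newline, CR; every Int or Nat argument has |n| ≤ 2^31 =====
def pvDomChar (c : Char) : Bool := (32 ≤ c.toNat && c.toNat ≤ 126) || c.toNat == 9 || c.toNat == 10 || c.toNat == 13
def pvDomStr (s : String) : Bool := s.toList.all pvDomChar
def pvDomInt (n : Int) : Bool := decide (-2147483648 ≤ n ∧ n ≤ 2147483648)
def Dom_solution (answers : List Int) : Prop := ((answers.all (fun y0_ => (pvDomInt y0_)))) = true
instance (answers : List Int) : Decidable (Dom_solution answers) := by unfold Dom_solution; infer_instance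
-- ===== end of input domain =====

-- B replaces A's fused index/modulo counting loop by three staged passes that consume
-- each pattern as a queue (refilled when exhausted), and replaces the 13-branch
-- comparison cascade by a max-and-filter selection (objective: alternative).

-- ===== PORT A =====
-- literal transliteration of A: fold over range(len(answers)) reading answers[i]
-- (i is always in range, so pyGetD is exact there) and the pattern lists at i%5, i%8, i%10,
-- then the if-elif cascade (chained comparisons 'x > y == z' split into their two conjuncts).
def solution (answers : List Int) : List Int :=
  let supo1p : List Int := [1, 2, 3, 4, 5]
  let supo2p : List Int := [2, 1, 2, 3, 2, 4, 2, 5]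
  let supo3p : List Int := [3, 3, 1, 1, 2, 2, 4, 4, 5, 5]
  let st :=
    (PySem.List.pyRange 0 (answers.length : Int) 1).foldl
      (fun (s : Int × Int × Int) i =>
        let a := PySem.List.pyGetD answers i 0
        ((if a = PySem.List.pyGetD supo1p (PySem.Int.mod i 5) 0 then s.1 + 1 else s.1),
         (if a = PySem.List.pyGetD supo2p (PySem.Int.mod i 8) 0 then s.2.1 + 1 else s.2.1),
         (if a = PySem.List.pyGetD supo3p (PySem.Int.mod i 10) 0 then s.2.2 + 1 else s.2.2)))
      (0, 0, 0)
  let supo1 := st.1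
  let supo2 := st.2.1
  let supo3 := st.2.2
  if supo1 = supo2 ∧ supo2 = supo3 then [1, 2, 3]
  else if supo3 > supo2 ∧ supo2 = supo1 then [3]
  else if supo3 < supo1 ∧ supo1 = supo2 then [1, 2]
  else if supo2 > supo3 ∧ supo3 = supo1 then [2]
  else if supo2 < supo1 ∧ supo1 = supo3 then [1, 3]
  else if supo1 > supo2 ∧ supo2 = supo3 then [1]
  else if supo1 < supo2 ∧ supo2 = supo3 then [2, 3]
  else if supo1 > supo2 ∧ supo2 > supo3 then [1]
  else if supo3 > supo1 ∧ supo1 > supo2 then [3]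
  else if supo2 > supo1 ∧ supo1 > supo3 then [2]
  else if supo1 > supo3 ∧ supo3 > supo2 then [1]
  else if supo2 > supo3 ∧ supo3 > supo1 then [2]
  else if supo3 > supo2 ∧ supo2 > supo1 then [3]
  else []

-- ===== PORT B =====
-- literal transliteration of Source B's inner 'score': one pass per pattern carrying (s, rem),
-- where rem is the remaining pattern queue, refilled with the full pattern when empty;
-- rem[0] is in range there (rem is nonempty after the refill), so pyGetD is exact;
-- rem[1:] is PySem.List.slice rem 1 none.
def solutionAltScore (pattern : List Int) (answers : List Int) : Int :=
  (answers.foldl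
    (fun (st : Int × List Int) a =>
      let rem := if st.2 = [] then pattern else st.2
      ((if a = PySem.List.pyGetD rem 0 0 then st.1 + 1 else st.1),
       PySem.List.slice rem (some 1) none))
    (0, [])).1

-- literal transliteration of Source B: scores = [score(p) for p in patterns],
-- best = max(scores), then the filtered enumeration of the score list.
def solution_alt (answers : List Int) : List Int :=
  let scores :=
    ([[1, 2, 3, 4, 5],
      [2, 1, 2, 3, 2, 4, 2, 5],
      [3, 3, 1, 1, 2, 2, 4, 4, 5, 5]] : List (List Int)).map
      (fun p => solutionAltScore p answers)
  let best := (PySem.List.max? scores (fun y => y)).getD 0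
  ((PySem.List.enumerate scores 0).filter (fun q => q.2 == best)).map (fun q => q.1 + 1)

-- ===== PRECONDITION & SPEC =====
def Spec_solution (answers : List Int) (out : List Int) : Prop := out = solution_alt answers
instance (answers : List Int) (out : List Int) : Decidable (Spec_solution answers out) := by unfold Spec_solution; infer_instance

-- ===== CLAIM =====
def Claim_equal_solution : Prop := ∀ (answers : List Int), Dom_solution answers → Spec_solution answers (solution answers)

-- ===== LEMMAS AND PROOFS =====

-- common characterisation of one student's score: number of positions k with
-- answers[k] = pattern[k % len(pattern)]
def cntSpec (p : List Int) (xs : List Int) (k : Nat) : Int :=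
  match xs with
  | [] => 0
  | a :: t =>
      (if a = PySem.List.pyGetD p ((k % p.length : Nat) : Int) 0 then 1 else 0) + cntSpec p t (k + 1)

-- A's fused counting fold over enumerated (index, answer) pairs computes the three cntSpec's
theorem A_fold (xs : List Int) (n : Nat) (s1 s2 s3 : Int) :
    (PySem.List.enumerate xs (n : Int)).foldl
      (fun (s : Int × Int × Int) (q : Int × Int) =>
        ((if q.2 = PySem.List.pyGetD [1,2,3,4,5] (PySem.Int.mod q.1 5) 0 then s.1 + 1 else s.1),
         (if q.2 = PySem.List.pyGetD [2,1,2,3,2,4,2,5] (PySem.Int.mod q.1 8) 0 then s.2.1 + 1 else s.2.1),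
         (if q.2 = PySem.List.pyGetD [3,3,1,1,2,2,4,4,5,5] (PySem.Int.mod q.1 10) 0 then s.2.2 + 1 else s.2.2)))
      (s1, s2, s3)
    = (s1 + cntSpec [1,2,3,4,5] xs n,
       s2 + cntSpec [2,1,2,3,2,4,2,5] xs n,
       s3 + cntSpec [3,3,1,1,2,2,4,4,5,5] xs n) := by
  induction xs generalizing n s1 s2 s3 with
  | nil => simp [cntSpec, PySem.List.enumerate_nil]
  | cons x t ih =>
    rw [PySem.List.enumerate_cons]
    simp only [List.foldl_cons]
    have e5 : PySem.Int.mod (n : Int) 5 = ((n % 5 : Nat) : Int) := by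
      rw [PySem.Int.mod_eq_emod_of_pos (by norm_num)]; push_cast; omega
    have e8 : PySem.Int.mod (n : Int) 8 = ((n % 8 : Nat) : Int) := by
      rw [PySem.Int.mod_eq_emod_of_pos (by norm_num)]; push_cast; omega
    have e10 : PySem.Int.mod (n : Int) 10 = ((n % 10 : Nat) : Int) := by
      rw [PySem.Int.mod_eq_emod_of_pos (by norm_num)]; push_cast; omega
    rw [e5, e8, e10]
    have ecast : ((n : Int) + 1) = ((n + 1 : Nat) : Int) := by push_cast; ring
    rw [ecast, ih (n + 1)]
    simp only [cntSpec, Prod.mk.injEq, List.length_cons, List.length_nil, Nat.reduceAdd]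
    refine ⟨?_, ?_, ?_⟩ <;> split_ifs <;> omega

-- B's queue-consuming pass computes cntSpec: the carried queue is p.drop (k % len p),
-- represented as [] exactly when k % len p = 0
theorem B_fold (p : List Int) (hp : p ≠ []) (xs : List Int) (k : Nat) (s : Int) :
    (xs.foldl
      (fun (st : Int × List Int) a =>
        let rem := if st.2 = [] then p else st.2
        ((if a = PySem.List.pyGetD rem 0 0 then st.1 + 1 else st.1),
         PySem.List.slice rem (some 1) none))
      (s, if k % p.length = 0 then [] else p.drop (k % p.length))).1
    = s + cntSpec p xs k := by
  have hm : 0 < p.length := List.length_pos_of_ne_nil hp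
  induction xs generalizing k s with
  | nil => simp [cntSpec]
  | cons a t ih =>
    simp only [List.foldl_cons]
    have hrem : (if (if k % p.length = 0 then ([] : List Int) else p.drop (k % p.length)) = [] then p else (if k % p.length = 0 then [] else p.drop (k % p.length))) = p.drop (k % p.length) := by
      by_cases h0 : k % p.length = 0
      · simp [h0]
      · have hlt : k % p.length < p.length := Nat.mod_lt _ hm
        have hne : p.drop (k % p.length) ≠ [] := by
          intro hnil
          have := congrArg List.length hnil
          simp [List.length_drop] at this
          omega
        simp [h0, hne]
    rw [hrem]
    have hlt : k % p.length < p.length := Nat.mod_lt _ hm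
    have hget : PySem.List.pyGetD (p.drop (k % p.length)) 0 0 = PySem.List.pyGetD p ((k % p.length : Nat) : Int) 0 := by
      have h1 : PySem.List.pyGetD (p.drop (k % p.length)) ((0 : Nat) : Int) 0 = (p.drop (k % p.length)).getD 0 0 := PySem.List.pyGetD_natCast _ _ _
      have h2 : PySem.List.pyGetD p ((k % p.length : Nat) : Int) 0 = p.getD (k % p.length) 0 := PySem.List.pyGetD_natCast _ _ _
      simp only [Nat.cast_zero] at h1
      rw [h1, h2]
      simp [List.getD, List.getElem?_drop]
    have htail : PySem.List.slice (p.drop (k % p.length)) (some 1) none = (if (k + 1) % p.length = 0 then ([] : List Int) else p.drop ((k + 1) % p.length)) := by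
      rw [PySem.List.slice_from_one, List.tail_drop]
      have hk := Nat.div_add_mod k p.length
      by_cases hend : k % p.length + 1 = p.length
      · have hmul : k + 1 = p.length * (k / p.length) + p.length := by omega
        have h0 : (k + 1) % p.length = 0 := by
          rw [hmul, Nat.mul_add_mod, Nat.mod_self]
        rw [hend, List.drop_length, if_pos h0]
      · have hlt2 : k % p.length + 1 < p.length := by omega
        have hsum : k + 1 = p.length * (k / p.length) + (k % p.length + 1) := by omega
        have h1 : (k + 1) % p.length = k % p.length + 1 := by
          rw [hsum, Nat.mul_add_mod, Nat.mod_eq_of_lt hlt2]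
        rw [h1, if_neg (by omega)]
    simp only [hget, htail]
    rw [ih (k + 1)]
    simp only [cntSpec]
    split_ifs <;> omega

theorem score_eq (p : List Int) (hp : p ≠ []) (answers : List Int) :
    solutionAltScore p answers = cntSpec p answers 0 := by
  have h := B_fold p hp answers 0 0
  simp only [Nat.zero_mod, reduceIte] at h
  simpa [solutionAltScore] using h

-- filtering the enumerated three-element score list unfolds to three independent ifs
theorem filter3 (a b c m : Int) :
    (List.filter (fun p => p.2 == m) [((0:Int),a),(1,b),(2,c)]).map (fun p => p.1+1)
    = (if a = m then [1] else []) ++ (if b = m then [2] else []) ++ (if c = m then [3] else []) := by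
  by_cases h1 : a = m <;> by_cases h2 : b = m <;> by_cases h3 : c = m <;>
    simp [h1, h2, h3]

-- A's 13-branch cascade equals B's max-and-filter selection, for any three scores
theorem select_eq (a b c : Int) :
    (if a = b ∧ b = c then ([1, 2, 3] : List Int)
     else if c > b ∧ b = a then [3]
     else if c < a ∧ a = b then [1, 2]
     else if b > c ∧ c = a then [2]
     else if b < a ∧ a = c then [1, 3]
     else if a > b ∧ b = c then [1]
     else if a < b ∧ b = c then [2, 3]
     else if a > b ∧ b > c then [1]
     else if c > a ∧ a > b then [3]
     else if b > a ∧ a > c then [2]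
     else if a > c ∧ c > b then [1]
     else if b > c ∧ c > a then [2]
     else if c > b ∧ b > a then [3]
     else [])
    = ((PySem.List.enumerate [a, b, c] 0).filter
        (fun p => p.2 == max a (max b c))).map (fun p => p.1 + 1) := by
  have h3 : PySem.List.enumerate [a,b,c] (0:Int) = [(0,a),(1,b),(2,c)] := by
    norm_num [PySem.List.enumerate_cons, PySem.List.enumerate_nil]
  rw [h3, filter3]
  obtain ⟨m, hmax, ha, hb, hc, hor⟩ :
      ∃ m, max a (max b c) = m ∧ a ≤ m ∧ b ≤ m ∧ c ≤ m ∧ (m = a ∨ m = b ∨ m = c) :=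
    ⟨max a (max b c), rfl, le_max_left _ _,
      le_trans (le_max_left _ _) (le_max_right _ _),
      le_trans (le_max_right _ _) (le_max_right _ _), by
        rcases max_choice a (max b c) with h | h
        · exact Or.inl h
        · rcases max_choice b c with h' | h' <;> rw [h, h'] <;> simp⟩
  rw [hmax]
  rcases lt_trichotomy a b with hab | hab | hab <;>
    rcases lt_trichotomy b c with hbc | hbc | hbc <;>
      rcases lt_trichotomy a c with hac | hac | hac
  · rw [if_neg (show ¬(a = b ∧ b = c) by omega)]
    rw [if_neg (show ¬(c > b ∧ b = a) by omega)]
    rw [if_neg (show ¬(c < a ∧ a = b) by omega)]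
    rw [if_neg (show ¬(b > c ∧ c = a) by omega)]
    rw [if_neg (show ¬(b < a ∧ a = c) by omega)]
    rw [if_neg (show ¬(a > b ∧ b = c) by omega)]
    rw [if_neg (show ¬(a < b ∧ b = c) by omega)]
    rw [if_neg (show ¬(a > b ∧ b > c) by omega)]
    rw [if_neg (show ¬(c > a ∧ a > b) by omega)]
    rw [if_neg (show ¬(b > a ∧ a > c) by omega)]
    rw [if_neg (show ¬(a > c ∧ c > b) by omega)]
    rw [if_neg (show ¬(b > c ∧ c > a) by omega)]
    rw [if_pos (show c > b ∧ b > a by omega)]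
    rw [if_neg (show ¬(a = m) by omega)]
    rw [if_neg (show ¬(b = m) by omega)]
    rw [if_pos (show c = m by omega)]
    rfl
  · omega
  · omega
  · rw [if_neg (show ¬(a = b ∧ b = c) by omega)]
    rw [if_neg (show ¬(c > b ∧ b = a) by omega)]
    rw [if_neg (show ¬(c < a ∧ a = b) by omega)]
    rw [if_neg (show ¬(b > c ∧ c = a) by omega)]
    rw [if_neg (show ¬(b < a ∧ a = c) by omega)]
    rw [if_neg (show ¬(a > b ∧ b = c) by omega)]
    rw [if_pos (show a < b ∧ b = c by omega)]
    rw [if_neg (show ¬(a = m) by omega)]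
    rw [if_pos (show b = m by omega)]
    rw [if_pos (show c = m by omega)]
    rfl
  · omega
  · omega
  · rw [if_neg (show ¬(a = b ∧ b = c) by omega)]
    rw [if_neg (show ¬(c > b ∧ b = a) by omega)]
    rw [if_neg (show ¬(c < a ∧ a = b) by omega)]
    rw [if_neg (show ¬(b > c ∧ c = a) by omega)]
    rw [if_neg (show ¬(b < a ∧ a = c) by omega)]
    rw [if_neg (show ¬(a > b ∧ b = c) by omega)]
    rw [if_neg (show ¬(a < b ∧ b = c) by omega)]
    rw [if_neg (show ¬(a > b ∧ b > c) by omega)]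
    rw [if_neg (show ¬(c > a ∧ a > b) by omega)]
    rw [if_neg (show ¬(b > a ∧ a > c) by omega)]
    rw [if_neg (show ¬(a > c ∧ c > b) by omega)]
    rw [if_pos (show b > c ∧ c > a by omega)]
    rw [if_neg (show ¬(a = m) by omega)]
    rw [if_pos (show b = m by omega)]
    rw [if_neg (show ¬(c = m) by omega)]
    rfl
  · rw [if_neg (show ¬(a = b ∧ b = c) by omega)]
    rw [if_neg (show ¬(c > b ∧ b = a) by omega)]
    rw [if_neg (show ¬(c < a ∧ a = b) by omega)]
    rw [if_pos (show b > c ∧ c = a by omega)]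
    rw [if_neg (show ¬(a = m) by omega)]
    rw [if_pos (show b = m by omega)]
    rw [if_neg (show ¬(c = m) by omega)]
    rfl
  · rw [if_neg (show ¬(a = b ∧ b = c) by omega)]
    rw [if_neg (show ¬(c > b ∧ b = a) by omega)]
    rw [if_neg (show ¬(c < a ∧ a = b) by omega)]
    rw [if_neg (show ¬(b > c ∧ c = a) by omega)]
    rw [if_neg (show ¬(b < a ∧ a = c) by omega)]
    rw [if_neg (show ¬(a > b ∧ b = c) by omega)]
    rw [if_neg (show ¬(a < b ∧ b = c) by omega)]
    rw [if_neg (show ¬(a > b ∧ b > c) by omega)]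
    rw [if_neg (show ¬(c > a ∧ a > b) by omega)]
    rw [if_pos (show b > a ∧ a > c by omega)]
    rw [if_neg (show ¬(a = m) by omega)]
    rw [if_pos (show b = m by omega)]
    rw [if_neg (show ¬(c = m) by omega)]
    rfl
  · rw [if_neg (show ¬(a = b ∧ b = c) by omega)]
    rw [if_pos (show c > b ∧ b = a by omega)]
    rw [if_neg (show ¬(a = m) by omega)]
    rw [if_neg (show ¬(b = m) by omega)]
    rw [if_pos (show c = m by omega)]
    rfl
  · omega
  · omega
  · omega
  · rw [if_pos (show a = b ∧ b = c by omega)]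
    rw [if_pos (show a = m by omega)]
    rw [if_pos (show b = m by omega)]
    rw [if_pos (show c = m by omega)]
    rfl
  · omega
  · omega
  · omega
  · rw [if_neg (show ¬(a = b ∧ b = c) by omega)]
    rw [if_neg (show ¬(c > b ∧ b = a) by omega)]
    rw [if_pos (show c < a ∧ a = b by omega)]
    rw [if_pos (show a = m by omega)]
    rw [if_pos (show b = m by omega)]
    rw [if_neg (show ¬(c = m) by omega)]
    rfl
  · rw [if_neg (show ¬(a = b ∧ b = c) by omega)]
    rw [if_neg (show ¬(c > b ∧ b = a) by omega)]
    rw [if_neg (show ¬(c < a ∧ a = b) by omega)]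
    rw [if_neg (show ¬(b > c ∧ c = a) by omega)]
    rw [if_neg (show ¬(b < a ∧ a = c) by omega)]
    rw [if_neg (show ¬(a > b ∧ b = c) by omega)]
    rw [if_neg (show ¬(a < b ∧ b = c) by omega)]
    rw [if_neg (show ¬(a > b ∧ b > c) by omega)]
    rw [if_pos (show c > a ∧ a > b by omega)]
    rw [if_neg (show ¬(a = m) by omega)]
    rw [if_neg (show ¬(b = m) by omega)]
    rw [if_pos (show c = m by omega)]
    rfl
  · rw [if_neg (show ¬(a = b ∧ b = c) by omega)]
    rw [if_neg (show ¬(c > b ∧ b = a) by omega)]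
    rw [if_neg (show ¬(c < a ∧ a = b) by omega)]
    rw [if_neg (show ¬(b > c ∧ c = a) by omega)]
    rw [if_pos (show b < a ∧ a = c by omega)]
    rw [if_pos (show a = m by omega)]
    rw [if_neg (show ¬(b = m) by omega)]
    rw [if_pos (show c = m by omega)]
    rfl
  · rw [if_neg (show ¬(a = b ∧ b = c) by omega)]
    rw [if_neg (show ¬(c > b ∧ b = a) by omega)]
    rw [if_neg (show ¬(c < a ∧ a = b) by omega)]
    rw [if_neg (show ¬(b > c ∧ c = a) by omega)]
    rw [if_neg (show ¬(b < a ∧ a = c) by omega)]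
    rw [if_neg (show ¬(a > b ∧ b = c) by omega)]
    rw [if_neg (show ¬(a < b ∧ b = c) by omega)]
    rw [if_neg (show ¬(a > b ∧ b > c) by omega)]
    rw [if_neg (show ¬(c > a ∧ a > b) by omega)]
    rw [if_neg (show ¬(b > a ∧ a > c) by omega)]
    rw [if_pos (show a > c ∧ c > b by omega)]
    rw [if_pos (show a = m by omega)]
    rw [if_neg (show ¬(b = m) by omega)]
    rw [if_neg (show ¬(c = m) by omega)]
    rfl
  · omega
  · omega
  · rw [if_neg (show ¬(a = b ∧ b = c) by omega)]
    rw [if_neg (show ¬(c > b ∧ b = a) by omega)]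
    rw [if_neg (show ¬(c < a ∧ a = b) by omega)]
    rw [if_neg (show ¬(b > c ∧ c = a) by omega)]
    rw [if_neg (show ¬(b < a ∧ a = c) by omega)]
    rw [if_pos (show a > b ∧ b = c by omega)]
    rw [if_pos (show a = m by omega)]
    rw [if_neg (show ¬(b = m) by omega)]
    rw [if_neg (show ¬(c = m) by omega)]
    rfl
  · omega
  · omega
  · rw [if_neg (show ¬(a = b ∧ b = c) by omega)]
    rw [if_neg (show ¬(c > b ∧ b = a) by omega)]
    rw [if_neg (show ¬(c < a ∧ a = b) by omega)]
    rw [if_neg (show ¬(b > c ∧ c = a) by omega)]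
    rw [if_neg (show ¬(b < a ∧ a = c) by omega)]
    rw [if_neg (show ¬(a > b ∧ b = c) by omega)]
    rw [if_neg (show ¬(a < b ∧ b = c) by omega)]
    rw [if_pos (show a > b ∧ b > c by omega)]
    rw [if_pos (show a = m by omega)]
    rw [if_neg (show ¬(b = m) by omega)]
    rw [if_neg (show ¬(c = m) by omega)]
    rfl

-- ===== VERDICT =====
theorem solution_spec : Claim_equal_solution := by
  intro answers _
  show solution answers = solution_alt answers
  simp only [solution, solution_alt]
  have hA :
      (PySem.List.pyRange 0 (answers.length : Int) 1).foldl
        (fun (s : Int × Int × Int) i =>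
          ((if PySem.List.pyGetD answers i 0 = PySem.List.pyGetD [1,2,3,4,5] (PySem.Int.mod i 5) 0 then s.1 + 1 else s.1),
           (if PySem.List.pyGetD answers i 0 = PySem.List.pyGetD [2,1,2,3,2,4,2,5] (PySem.Int.mod i 8) 0 then s.2.1 + 1 else s.2.1),
           (if PySem.List.pyGetD answers i 0 = PySem.List.pyGetD [3,3,1,1,2,2,4,4,5,5] (PySem.Int.mod i 10) 0 then s.2.2 + 1 else s.2.2)))
        ((0 : Int), (0 : Int), (0 : Int))
      = (cntSpec [1,2,3,4,5] answers 0,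
         cntSpec [2,1,2,3,2,4,2,5] answers 0,
         cntSpec [3,3,1,1,2,2,4,4,5,5] answers 0) := by
    have hmap := PySem.List.enumerate_eq_map_pyRange answers (0 : Int)
    have h := A_fold answers 0 0 0 0
    rw [Nat.cast_zero] at h
    rw [hmap, List.foldl_map] at h
    simpa using h
  rw [hA]
  simp only [List.map_cons, List.map_nil]
  rw [score_eq _ (by simp) answers, score_eq _ (by simp) answers, score_eq _ (by simp) answers]
  rw [PySem.List.max?_id_cons]
  simp only [Option.getD_some, List.foldl_cons, List.foldl_nil]
  rw [show ∀ x y z : Int, max (max x y) z = max x (max y z) from fun x y z => max_assoc x y z]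
  exact select_eq _ _ _
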